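-- pv_equiv track=rewrite | github.com/Rahul140799/Placement-Kit | CodeChef/June2020/priceLimit.py | priceon
-- ===== SOURCE A (Python) =====
-- def priceon(arr,k):
--     curr = sum(arr)
--     new = 0
--     temp = []
--     for i in arr:
--         if i > k:
--             temp.append(k)
--         else:
--             temp.append(i)
--     new = sum(temp)
--     return curr - new
-- ===== SOURCE B (Python) =====
-- def priceon(arr, k):
--     total = 0
--     for i in arr:
--         if i > k:
--             total += i - k
--     return total
-- ===== Notes on version B (the rewrite author's own statement) =====
-- stated objective: simpler
-- what changed: Replaced A's total-minus-clamped-list decomposition (build a clamped temp list, sum it and the original, subtract) with a single-pass accumulator adding i-k for each element above k.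
import Mathlib
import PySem

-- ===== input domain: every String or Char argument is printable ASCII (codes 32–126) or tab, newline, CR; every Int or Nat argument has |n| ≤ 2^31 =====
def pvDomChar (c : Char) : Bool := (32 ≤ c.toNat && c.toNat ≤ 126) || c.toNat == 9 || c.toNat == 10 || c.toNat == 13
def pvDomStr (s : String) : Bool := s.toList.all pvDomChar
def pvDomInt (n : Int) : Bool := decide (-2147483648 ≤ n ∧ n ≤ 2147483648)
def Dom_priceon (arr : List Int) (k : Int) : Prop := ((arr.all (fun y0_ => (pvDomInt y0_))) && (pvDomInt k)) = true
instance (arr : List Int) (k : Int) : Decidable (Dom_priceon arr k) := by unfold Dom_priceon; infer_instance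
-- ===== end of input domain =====

-- B replaces A's sum(arr) − sum(clamped list) decomposition with one direct pass accumulating the excess (objective: simpler).

-- ===== PORT A =====
def priceon (arr : List Int) (k : Int) : Int :=
  let curr := arr.sum
  let temp := arr.foldl (fun temp i => if i > k then temp ++ [k] else temp ++ [i]) []
  let new := temp.sum
  curr - new

-- ===== PORT B =====
def priceon_alt (arr : List Int) (k : Int) : Int :=
  arr.foldl (fun total i => if i > k then total + (i - k) else total) 0

-- ===== PRECONDITION & SPEC =====
def Spec_priceon (arr : List Int) (k : Int) (out : Int) : Prop := out = priceon_alt arr k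
instance (arr : List Int) (k : Int) (out : Int) : Decidable (Spec_priceon arr k out) := by unfold Spec_priceon; infer_instance

-- ===== CLAIM (what is proved, stated in full; the proofs are below) =====
def Claim_equal_priceon : Prop := ∀ (arr : List Int) (k : Int), Dom_priceon arr k → Spec_priceon arr k (priceon arr k)

-- ===== LEMMAS AND PROOFS =====
theorem pv_temp_append (k : Int) (arr : List Int) (t : List Int) :
    (arr.foldl (fun temp i => if i > k then temp ++ [k] else temp ++ [i]) t)
      = t ++ arr.foldl (fun temp i => if i > k then temp ++ [k] else temp ++ [i]) [] := by
  induction arr generalizing t with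
  | nil => simp
  | cons a as ih =>
    simp only [List.foldl_cons]
    rw [ih]
    conv_rhs => rw [ih]
    split_ifs <;> simp

theorem pv_alt_add (k : Int) (arr : List Int) (t : Int) :
    (arr.foldl (fun total i => if i > k then total + (i - k) else total) t)
      = t + arr.foldl (fun total i => if i > k then total + (i - k) else total) 0 := by
  induction arr generalizing t with
  | nil => simp
  | cons a as ih =>
    simp only [List.foldl_cons]
    rw [ih]
    conv_rhs => rw [ih]
    split_ifs <;> ring

theorem pv_main (k : Int) (arr : List Int) :
    arr.sum - (arr.foldl (fun temp i => if i > k then temp ++ [k] else temp ++ [i]) []).sum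
      = arr.foldl (fun total i => if i > k then total + (i - k) else total) 0 := by
  induction arr with
  | nil => simp
  | cons a as ih =>
    simp only [List.foldl_cons, List.sum_cons]
    rw [pv_temp_append, pv_alt_add]
    split_ifs <;>
      simp only [List.sum_append, List.sum_cons, List.sum_nil] <;> omega

-- ===== VERDICT (by name: the statement is the Claim_ definition above) =====
theorem priceon_spec : Claim_equal_priceon := by
  intro arr k _
  show priceon arr k = priceon_alt arr k
  simpa [priceon, priceon_alt] using pv_main k arr
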